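-- pv_equiv track=rewrite | github.com/okagent/survey-agent | data_processing/extract_pdf.py | find_reference_or_acknowledgement_section
-- ===== SOURCE A (Python) =====
-- def find_reference_or_acknowledgement_section(section_page_dict_list):
--     """
--     在section列表中找到最后一个包含"References"或者"Reference"或者"Bibliography的section，
--     如果没有找到，则找包含"Acknowledgements"的section。
--     还没找到再找"Appendix"的section。将找到的section及其后面的部分删去。
--
--     param section_page_dict_list: 一个包含section名称的列表
--     Returns: 找到的section名称，或者None
--     """
--
--     ref_section = None
--     ack_section = None
--     app_section = None
--
--     for section in section_page_dict_list:
--         section_name = section.lower()  # 假设section的名称是每个元组的第一个元素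
--         if "reference" in section_name or 'bibliography' in section_name:
--             ref_section = section  # 更新为最后一个包含“References”的section
--         elif ("acknowledgements" in section_name or "acknowledgments" in section_name) and ref_section is None:
--             ack_section = section # 只有在还没有找到含有“References”的section时才记录
--         elif "appendix" in section_name and ref_section is None and ack_section is None:
--             app_section = section  # 只有在还没有找到含有“References”或“Acknowledgements”的section时才记录
--
--     return ref_section if ref_section is not None else ack_section if ack_section is not None else app_section
-- ===== SOURCE B (Python) =====
-- def find_reference_or_acknowledgement_section(section_page_dict_list):
--     lows = [s.lower() for s in section_page_dict_list]
--     for keys in (("reference", "bibliography"),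
--                  ("acknowledgements", "acknowledgments"),
--                  ("appendix",)):
--         matches = [s for s, l in zip(section_page_dict_list, lows)
--                    if any(k in l for k in keys)]
--         if matches:
--             return matches[-1]
--     return None
-- ===== Notes on version B (the rewrite author's own statement) =====
-- stated objective: simpler
-- what changed: Replaces the single accumulator loop over a three-slot state machine with three priority-ordered filter passes, each returning its last match.
import Mathlib
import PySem

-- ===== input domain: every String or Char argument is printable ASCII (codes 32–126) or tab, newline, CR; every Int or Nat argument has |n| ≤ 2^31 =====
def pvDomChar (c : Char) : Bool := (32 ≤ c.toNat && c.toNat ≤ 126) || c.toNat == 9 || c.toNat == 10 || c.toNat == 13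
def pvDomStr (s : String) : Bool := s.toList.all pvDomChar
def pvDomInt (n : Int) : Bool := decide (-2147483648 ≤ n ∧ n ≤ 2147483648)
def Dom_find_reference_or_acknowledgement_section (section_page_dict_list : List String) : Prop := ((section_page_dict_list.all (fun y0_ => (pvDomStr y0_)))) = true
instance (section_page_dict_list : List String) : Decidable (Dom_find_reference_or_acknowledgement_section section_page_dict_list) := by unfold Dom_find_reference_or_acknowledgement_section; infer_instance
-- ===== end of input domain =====

-- B replaces A's single accumulator loop (three mutable slots, elif chain) with three
-- priority-ordered filter passes, each returning its last match: a simpler decomposition.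


-- ===== PORT A =====
-- one step of A's loop body: state = (ref_section, ack_section, app_section)
def pvStepA (st : Option String × Option String × Option String) (section_ : String) :
    Option String × Option String × Option String :=
  let section_name := PySem.Str.lower section_
  if PySem.Str.isIn "reference" section_name || PySem.Str.isIn "bibliography" section_name then
    (some section_, st.2.1, st.2.2)
  else if (PySem.Str.isIn "acknowledgements" section_name || PySem.Str.isIn "acknowledgments" section_name) && st.1.isNone then
    (st.1, some section_, st.2.2)
  else if PySem.Str.isIn "appendix" section_name && st.1.isNone && st.2.1.isNone then
    (st.1, st.2.1, some section_)
  else st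

def find_reference_or_acknowledgement_section (section_page_dict_list : List String) : Option String :=
  let st := section_page_dict_list.foldl pvStepA (none, none, none)
  -- ref_section if not None else ack_section if not None else app_section
  match st.1 with
  | some r => some r
  | none => match st.2.1 with
    | some a => some a
    | none => st.2.2

-- ===== PORT B =====
-- one filter pass: sections whose (precomputed) lowercase form contains one of the keys
def pvMatchesB (keys : List String) (lst lows : List String) : List String :=
  ((lst.zip lows).filter (fun p => keys.any (fun k => PySem.Str.isIn k p.2))).map Prod.fst

def find_reference_or_acknowledgement_section_alt (section_page_dict_list : List String) : Option String :=
  let lows := section_page_dict_list.map PySem.Str.lower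
  match (pvMatchesB ["reference", "bibliography"] section_page_dict_list lows).getLast? with
  | some s => some s
  | none =>
    match (pvMatchesB ["acknowledgements", "acknowledgments"] section_page_dict_list lows).getLast? with
    | some s => some s
    | none =>
      match (pvMatchesB ["appendix"] section_page_dict_list lows).getLast? with
      | some s => some s
      | none => none

-- ===== PRECONDITION & SPEC =====
def Spec_find_reference_or_acknowledgement_section (section_page_dict_list : List String) (out : Option String) : Prop := out = find_reference_or_acknowledgement_section_alt section_page_dict_list
instance (section_page_dict_list : List String) (out : Option String) : Decidable (Spec_find_reference_or_acknowledgement_section section_page_dict_list out) := by unfold Spec_find_reference_or_acknowledgement_section; infer_instance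

-- ===== CLAIM (what is proved, stated in full; the proofs are below) =====
def Claim_equal_find_reference_or_acknowledgement_section : Prop := ∀ (section_page_dict_list : List String), Dom_find_reference_or_acknowledgement_section section_page_dict_list → Spec_find_reference_or_acknowledgement_section section_page_dict_list (find_reference_or_acknowledgement_section section_page_dict_list)

-- ===== LEMMAS AND PROOFS =====

-- the three match predicates on a single section string
def pvPR (s : String) : Bool :=
  PySem.Str.isIn "reference" (PySem.Str.lower s) || PySem.Str.isIn "bibliography" (PySem.Str.lower s)
def pvPA (s : String) : Bool :=
  PySem.Str.isIn "acknowledgements" (PySem.Str.lower s) || PySem.Str.isIn "acknowledgments" (PySem.Str.lower s)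
def pvPP (s : String) : Bool :=
  PySem.Str.isIn "appendix" (PySem.Str.lower s)

-- B's zip-filter-map pass is a plain filter by the predicate on the section itself
theorem pvMatchesB_eq (keys : List String) (lst : List String) :
    pvMatchesB keys lst (lst.map PySem.Str.lower)
      = lst.filter (fun s => keys.any (fun k => PySem.Str.isIn k (PySem.Str.lower s))) := by
  induction lst with
  | nil => rfl
  | cons x xs ih =>
    unfold pvMatchesB
    rw [List.map_cons, List.zip_cons_cons, List.filter_cons, List.filter_cons]
    cases h : (keys.any fun k => PySem.Str.isIn k (PySem.Str.lower x)) with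
    | true => exact congrArg (List.cons x) ih
    | false => exact ih

theorem pvGetLast?_cons (x : String) (l : List String) :
    (x :: l).getLast? = l.getLast?.or (some x) := by
  cases l with
  | nil => rfl
  | cons y ys => simp [List.getLast?_cons, Option.or]

-- right-nested fallback chain: refs, then the saved ref, then acks, the saved ack, apps, the saved app
def pvChain (xs : List String) (r a p : Option String) : Option String :=
  ((xs.filter pvPR).getLast?).or (r.or
    (((xs.filter pvPA).getLast?).or (a.or
      (((xs.filter pvPP).getLast?).or p))))

-- the invariant of A's loop: the final answer from any starting state is the fallback chain
theorem pvLoop_inv (xs : List String) (r a p : Option String) :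
    (match (xs.foldl pvStepA (r, a, p)).1 with
     | some rv => some rv
     | none => match (xs.foldl pvStepA (r, a, p)).2.1 with
       | some av => some av
       | none => (xs.foldl pvStepA (r, a, p)).2.2)
      = pvChain xs r a p := by
  induction xs generalizing r a p with
  | nil =>
    simp only [List.foldl_nil, pvChain, List.filter_nil, List.getLast?_nil, Option.none_or]
    cases r <;> cases a <;> rfl
  | cons x xs ih =>
    rw [List.foldl_cons]
    by_cases hr : pvPR x = true
    · have hstep : pvStepA (r, a, p) x = (some x, a, p) := by
        simp only [pvPR] at hr
        simp only [pvStepA, hr, if_true]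
      rw [hstep, ih]
      simp only [pvChain, List.filter_cons, hr, if_true, pvGetLast?_cons]
      cases h1 : (xs.filter pvPR).getLast? <;>
        by_cases ha : pvPA x = true <;> by_cases hp : pvPP x = true <;>
        simp [ha, hp, pvGetLast?_cons, Option.or]
    · have hrf : pvPR x = false := by simpa using hr
      by_cases ha : pvPA x = true
      · cases r with
        | some rv =>
          have hstep : pvStepA (some rv, a, p) x = (some rv, a, p) := by
            simp only [pvPR, pvPA] at hrf ha
            simp only [pvStepA, hrf, ha, Option.isNone_some, Bool.and_false, Bool.true_and,
              Bool.false_and, Bool.false_eq_true, if_false]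
          rw [hstep, ih]
          simp only [pvChain, List.filter_cons, hrf, ha, if_true, Bool.false_eq_true, if_false,
            pvGetLast?_cons]
          cases h1 : (xs.filter pvPR).getLast? <;>
            cases h2 : (xs.filter pvPA).getLast? <;> simp [Option.or]
        | none =>
          have hstep : pvStepA (none, a, p) x = (none, some x, p) := by
            simp only [pvPR, pvPA] at hrf ha
            simp only [pvStepA, hrf, ha, Option.isNone_none, Bool.and_true, Bool.true_and,
              Bool.false_eq_true, if_false, if_true]
          rw [hstep, ih]
          simp only [pvChain, List.filter_cons, hrf, ha, if_true, Bool.false_eq_true, if_false,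
            pvGetLast?_cons, Option.none_or]
          cases h1 : (xs.filter pvPR).getLast? <;>
            cases h2 : (xs.filter pvPA).getLast? <;> simp [Option.or]
      · have haf : pvPA x = false := by simpa using ha
        by_cases hp : pvPP x = true
        · cases r with
          | some rv =>
            have hstep : pvStepA (some rv, a, p) x = (some rv, a, p) := by
              simp only [pvPR, pvPA, pvPP] at hrf haf hp
              simp only [pvStepA, hrf, haf, hp, Option.isNone_some, Bool.and_false, Bool.true_and,
                Bool.false_and, Bool.false_eq_true, if_false]
            rw [hstep, ih]
            simp only [pvChain, List.filter_cons, hrf, haf, hp, if_true, Bool.false_eq_true,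
              if_false, pvGetLast?_cons]
            cases h1 : (xs.filter pvPR).getLast? <;>
              cases h2 : (xs.filter pvPA).getLast? <;> simp [Option.or]
          | none =>
            cases a with
            | some av =>
              have hstep : pvStepA (none, some av, p) x = (none, some av, p) := by
                simp only [pvPR, pvPA, pvPP] at hrf haf hp
                simp only [pvStepA, hrf, haf, hp, Option.isNone_none, Option.isNone_some,
                  Bool.and_true, Bool.and_false, Bool.true_and, Bool.false_and,
                  Bool.false_eq_true, if_false]
              rw [hstep, ih]
              simp only [pvChain, List.filter_cons, hrf, haf, hp, if_true, Bool.false_eq_true,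
                if_false, pvGetLast?_cons, Option.none_or]
              cases h1 : (xs.filter pvPR).getLast? <;>
                cases h2 : (xs.filter pvPA).getLast? <;>
                cases h3 : (xs.filter pvPP).getLast? <;> simp [Option.or]
            | none =>
              have hstep : pvStepA (none, none, p) x = (none, none, some x) := by
                simp only [pvPR, pvPA, pvPP] at hrf haf hp
                simp only [pvStepA, hrf, haf, hp, Option.isNone_none, Bool.and_true, Bool.true_and,
                  Bool.false_eq_true, if_false, if_true]
              rw [hstep, ih]
              simp only [pvChain, List.filter_cons, hrf, haf, hp, if_true, Bool.false_eq_true,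
                if_false, pvGetLast?_cons, Option.none_or]
              cases h1 : (xs.filter pvPR).getLast? <;>
                cases h2 : (xs.filter pvPA).getLast? <;>
                cases h3 : (xs.filter pvPP).getLast? <;> simp [Option.or]
        · have hpf : pvPP x = false := by simpa using hp
          have hstep : pvStepA (r, a, p) x = (r, a, p) := by
            simp only [pvPR, pvPA, pvPP] at hrf haf hpf
            simp only [pvStepA, hrf, haf, hpf, Bool.false_and, Bool.false_eq_true, if_false]
          rw [hstep, ih]
          simp only [pvChain, List.filter_cons, hrf, haf, hpf, Bool.false_eq_true, if_false]

-- fold the three keyword lists into the predicates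
theorem pvAny_pr : (fun s => List.any ["reference", "bibliography"] fun k => PySem.Str.isIn k (PySem.Str.lower s)) = pvPR := by
  funext s; simp [pvPR, List.any]
theorem pvAny_pa : (fun s => List.any ["acknowledgements", "acknowledgments"] fun k => PySem.Str.isIn k (PySem.Str.lower s)) = pvPA := by
  funext s; simp [pvPA, List.any]
theorem pvAny_pp : (fun s => List.any ["appendix"] fun k => PySem.Str.isIn k (PySem.Str.lower s)) = pvPP := by
  funext s; simp [pvPP, List.any]

-- ===== VERDICT (by name: the statement is the Claim_ definition above) =====
theorem find_reference_or_acknowledgement_section_spec : Claim_equal_find_reference_or_acknowledgement_section := by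
  intro xs _
  unfold Spec_find_reference_or_acknowledgement_section
  unfold find_reference_or_acknowledgement_section find_reference_or_acknowledgement_section_alt
  simp only [pvMatchesB_eq, pvAny_pr, pvAny_pa, pvAny_pp]
  rw [pvLoop_inv]
  simp only [pvChain, Option.none_or, Option.or_none]
  cases h1 : (xs.filter pvPR).getLast? <;>
    cases h2 : (xs.filter pvPA).getLast? <;>
    cases h3 : (xs.filter pvPP).getLast? <;> simp [Option.or]
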